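-- pv_equiv track=rewrite | github.com/NeilMoraes/neil_aoc2023 | day11.py | number_galaxies
-- ===== SOURCE A (Python) =====
-- def number_galaxies(data):
--     """Number galaxies"""
--     num = 1
--     numbered_data = []
--     for row in data:
--         while row.find("#") != -1:
--             row = row.replace("#", str(num), 1)
--             num += 1
--         numbered_data.append(row)
--     return numbered_data
-- ===== SOURCE B (Python) =====
-- def number_galaxies(data):
--     """Number galaxies"""
--     num = 1
--     numbered_data = []
--     for row in data:
--         parts = row.split("#")
--         pieces = [parts[0]]
--         for part in parts[1:]:
--             pieces.append(str(num))
--             pieces.append(part)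
--             num += 1
--         numbered_data.append("".join(pieces))
--     return numbered_data
-- ===== Notes on version B (the rewrite author's own statement) =====
-- stated objective: alternative
-- what changed: B splits each row on '#' once and interleaves the counter values between the segments with a join, instead of A's repeated find-and-replace-first rescans of the row.
import Mathlib
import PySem

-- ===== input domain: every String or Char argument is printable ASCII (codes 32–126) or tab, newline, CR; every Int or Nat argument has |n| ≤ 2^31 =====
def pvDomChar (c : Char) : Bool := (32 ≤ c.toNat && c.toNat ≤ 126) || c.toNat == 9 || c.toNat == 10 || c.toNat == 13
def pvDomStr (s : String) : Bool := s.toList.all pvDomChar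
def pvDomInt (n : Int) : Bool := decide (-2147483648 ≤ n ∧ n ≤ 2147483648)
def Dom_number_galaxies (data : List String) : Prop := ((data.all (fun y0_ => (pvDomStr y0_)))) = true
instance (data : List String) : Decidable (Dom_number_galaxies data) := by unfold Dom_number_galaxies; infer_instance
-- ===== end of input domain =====

-- B rebuilds each row by splitting it on '#' once and interleaving the counter values between
-- the segments, instead of A's repeated find/replace-first rescans; alternative decomposition,
-- same return value, no speed claim.

-- ===== PORT A =====
-- hand port of row.replace("#", t, 1) for the single-character pattern "#" (PySem.Chars.replace
-- has no count argument): replaces exactly the first occurrence of '#'; exact for this pattern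
def pvReplaceFirstHash (t : List Char) : List Char → List Char
  | [] => []
  | c :: cs => if c = '#' then t ++ cs else c :: pvReplaceFirstHash t cs

-- termination facts for the while loop below (str(num) never contains '#', so each
-- replacement strictly decreases the number of '#' in the row)
theorem pv_digitChar_ne : ∀ (m : Nat), Nat.digitChar m ≠ '#'
  | 0 | 1 | 2 | 3 | 4 | 5 | 6 | 7 | 8 | 9 | 10 | 11 | 12 | 13 | 14 | 15 => by decide
  | (_ + 16) => by
      simp only [Nat.digitChar]
      rw [if_neg (by omega), if_neg (by omega), if_neg (by omega), if_neg (by omega),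
          if_neg (by omega), if_neg (by omega), if_neg (by omega), if_neg (by omega),
          if_neg (by omega), if_neg (by omega), if_neg (by omega), if_neg (by omega),
          if_neg (by omega), if_neg (by omega), if_neg (by omega), if_neg (by omega)]
      decide

theorem pv_toDigitsCore_ne (b : Nat) : ∀ (f n : Nat) (acc : List Char), '#' ∉ acc →
    '#' ∉ Nat.toDigitsCore b f n acc := by
  intro f
  induction f with
  | zero => intro n acc h; simpa [Nat.toDigitsCore] using h
  | succ f ih =>
    intro n acc h
    have hd : '#' ∉ (n % b).digitChar :: acc := by
      simp only [List.mem_cons, not_or]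
      exact ⟨fun hc => pv_digitChar_ne _ hc.symm, h⟩
    simp only [Nat.toDigitsCore]
    split
    · exact hd
    · exact ih _ _ hd

theorem pv_hash_not_in_toChars (n : Int) : '#' ∉ PySem.Int.toChars n := by
  simp only [PySem.Int.toChars, Nat.toDigits]
  split
  · simp only [List.mem_cons, not_or]
    exact ⟨by decide, pv_toDigitsCore_ne 10 _ _ [] (by simp)⟩
  · exact pv_toDigitsCore_ne 10 _ _ [] (by simp)

theorem pv_replaceFirst_count (t : List Char) :
    ∀ (l : List Char), '#' ∈ l →
      (pvReplaceFirstHash t l).count '#' + 1 = t.count '#' + l.count '#' := by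
  intro l
  induction l with
  | nil => intro h; cases h
  | cons c cs ih =>
    intro h
    by_cases hc : c = '#'
    · subst hc
      simp [pvReplaceFirstHash, List.count_append]
      omega
    · have hm : '#' ∈ cs := by
        rcases List.mem_cons.mp h with h1 | h1
        · exact absurd h1.symm hc
        · exact h1
      have h2 := ih hm
      simp [pvReplaceFirstHash, hc]
      omega

theorem pv_singleton_infix (c : Char) (l : List Char) : [c] <:+: l ↔ c ∈ l := by
  constructor
  · intro h; exact h.sublist.subset (by simp)
  · intro h
    rcases List.append_of_mem h with ⟨s, t, rfl⟩
    exact ⟨s, t, by simp⟩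

theorem pv_mem_of_find_ne (l : List Char) (h : PySem.Chars.find l ['#'] ≠ -1) : '#' ∈ l :=
  (pv_singleton_infix '#' l).mp ((PySem.Chars.find_ne_neg_one_iff l ['#']).mp h)

-- while row.find("#") != -1: row = row.replace("#", str(num), 1); num += 1
def pvNumRow (num : Int) (row : List Char) : Int × List Char :=
  if h : PySem.Chars.find row ['#'] ≠ -1 then
    pvNumRow (num + 1) (pvReplaceFirstHash (PySem.Int.toChars num) row)
  else (num, row)
  termination_by row.count '#'
  decreasing_by
    have hm := pv_mem_of_find_ne row h
    have hc := pv_replaceFirst_count (PySem.Int.toChars num) row hm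
    have ht : (PySem.Int.toChars num).count '#' = 0 :=
      List.count_eq_zero.mpr (pv_hash_not_in_toChars num)
    omega

def number_galaxies (data : List String) : List String :=
  (data.foldl (fun (st : Int × List String) (row : String) =>
      let r := pvNumRow st.1 row.toList
      (r.1, st.2 ++ [String.ofList r.2])) ((1 : Int), ([] : List String))).2

-- ===== PORT B =====
def pvRowAlt (num : Int) (row : List Char) : Int × List Char :=
  let parts := PySem.Chars.splitOn row ['#']
  let st := parts.tail.foldl (fun (s : List (List Char) × Int) part =>
      (s.1 ++ [PySem.Int.toChars s.2, part], s.2 + 1)) ([parts.headD []], num)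
  (st.2, PySem.Chars.join [] st.1)

def number_galaxies_alt (data : List String) : List String :=
  (data.foldl (fun (st : Int × List String) (row : String) =>
      let r := pvRowAlt st.1 row.toList
      (r.1, st.2 ++ [String.ofList r.2])) ((1 : Int), ([] : List String))).2

-- ===== PRECONDITION & SPEC =====
def Spec_number_galaxies (data : List String) (out : List String) : Prop := out = number_galaxies_alt data
instance (data : List String) (out : List String) : Decidable (Spec_number_galaxies data out) := by unfold Spec_number_galaxies; infer_instance

-- ===== CLAIM (what is proved, stated in full; the proofs are below) =====
def Claim_equal_number_galaxies : Prop := ∀ (data : List String), Dom_number_galaxies data → Spec_number_galaxies data (number_galaxies data)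

-- ===== LEMMAS AND PROOFS =====

-- reference split of a row at every '#' (pre = segment collected so far)
def pvSplitHash (pre : List Char) : List Char → List (List Char)
  | [] => [pre]
  | c :: cs => if c = '#' then pre :: pvSplitHash [] cs else pvSplitHash (pre ++ [c]) cs

-- the interleaving both programs produce after the first segment
def pvInter (num : Int) : List (List Char) → List Char
  | [] => []
  | q :: qs => PySem.Int.toChars num ++ q ++ pvInter (num + 1) qs

theorem pv_splitOn_go_eq : ∀ (l : List Char) (fuel : Nat) (cur : List Char)
    (acc : List (List Char)), l.length ≤ fuel →
    PySem.Chars.splitOn.go ['#'] fuel l cur acc = acc.reverse ++ pvSplitHash cur.reverse l := by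
  intro l
  induction l with
  | nil =>
    intro fuel cur acc _
    cases fuel <;> simp [PySem.Chars.splitOn.go, pvSplitHash]
  | cons c cs ih =>
    intro fuel cur acc hf
    cases fuel with
    | zero => simp at hf
    | succ f =>
      by_cases hc : c = '#'
      · subst hc
        have hpre : List.isPrefixOf ['#'] ('#' :: cs) = true := by
          simp [List.isPrefixOf]
        simp only [PySem.Chars.splitOn.go, hpre, if_pos, List.length_cons, List.length_nil,
          List.drop_succ_cons, List.drop_zero]
        rw [ih f [] (cur.reverse :: acc) (by simpa using Nat.le_of_succ_le_succ hf)]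
        simp [pvSplitHash]
      · have hpre : List.isPrefixOf ['#'] (c :: cs) = false := by
          simp [List.isPrefixOf]
          exact fun hh => hc hh.symm
        simp only [PySem.Chars.splitOn.go, hpre]
        rw [if_neg (by simp)]
        rw [ih f (c :: cur) acc (by simpa using Nat.le_of_succ_le_succ hf)]
        simp [pvSplitHash, hc]
  
theorem pv_splitOn_eq (l : List Char) :
    PySem.Chars.splitOn l ['#'] = pvSplitHash [] l := by
  have := pv_splitOn_go_eq l (l.length + 1) [] [] (by omega)
  simpa [PySem.Chars.splitOn] using this

theorem pv_splitHash_ne_nil (l : List Char) : ∀ pre, pvSplitHash pre l ≠ [] := by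
  induction l with
  | nil => intro pre; simp [pvSplitHash]
  | cons c cs ih =>
    intro pre
    by_cases hc : c = '#' <;> simp [pvSplitHash, hc, ih]

theorem pv_splitHash_parts (l : List Char) : ∀ pre, '#' ∉ pre →
    (∀ p ∈ pvSplitHash pre l, '#' ∉ p) ∧
    PySem.Chars.join ['#'] (pvSplitHash pre l) = pre ++ l := by
  induction l with
  | nil =>
    intro pre hp
    refine ⟨?_, by simp [pvSplitHash, PySem.Chars.join_singleton]⟩
    intro p hpmem
    simp [pvSplitHash] at hpmem
    subst hpmem; exact hp
  | cons c cs ih =>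
    intro pre hp
    by_cases hc : c = '#'
    · subst hc
      obtain ⟨hfree, hjoin⟩ := ih [] (by simp)
      obtain ⟨r0, rs, hr⟩ := List.exists_cons_of_ne_nil (pv_splitHash_ne_nil cs [])
      have hsp : pvSplitHash pre ('#' :: cs) = pre :: pvSplitHash [] cs := by
        simp [pvSplitHash]
      rw [hsp, hr]
      rw [hr] at hfree hjoin
      refine ⟨?_, ?_⟩
      · intro p hpmem
        rcases List.mem_cons.mp hpmem with h1 | h1
        · subst h1; exact hp
        · exact hfree p h1
      · rw [PySem.Chars.join_cons_cons, hjoin]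
        simp
    · have hpc : '#' ∉ pre ++ [c] := by
        simp only [List.mem_append, List.mem_singleton, not_or]
        exact ⟨hp, fun hh => hc hh.symm⟩
      obtain ⟨hfree, hjoin⟩ := ih (pre ++ [c]) hpc
      refine ⟨?_, ?_⟩
      · intro p hpmem
        simp only [pvSplitHash, if_neg hc] at hpmem
        exact hfree p hpmem
      · simp only [pvSplitHash, if_neg hc]
        rw [hjoin]; simp
    
theorem pv_join_nil (ps : List (List Char)) : PySem.Chars.join [] ps = ps.flatten := by
  induction ps with
  | nil => simp [PySem.Chars.join_nil]
  | cons a as ih =>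
    cases as with
    | nil => simp [PySem.Chars.join_singleton]
    | cons b bs => rw [PySem.Chars.join_cons_cons, ih]; simp

theorem pv_replaceFirst_eq (t : List Char) :
    ∀ (p r : List Char), '#' ∉ p →
      pvReplaceFirstHash t (p ++ '#' :: r) = p ++ t ++ r := by
  intro p
  induction p with
  | nil => intro r _; simp [pvReplaceFirstHash]
  | cons c cs ih =>
    intro r h
    have hc : c ≠ '#' := fun hh => h (by simp [hh])
    have hcs : '#' ∉ cs := fun hh => h (by simp [hh])
    simp [pvReplaceFirstHash, hc, ih r hcs]

theorem pv_numRow_join (ps : List (List Char)) : ∀ (p : List Char) (num : Int),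
    '#' ∉ p → (∀ q ∈ ps, '#' ∉ q) →
    pvNumRow num (PySem.Chars.join ['#'] (p :: ps)) = (num + ps.length, p ++ pvInter num ps) := by
  induction ps with
  | nil =>
    intro p num hp _
    rw [PySem.Chars.join_singleton, pvNumRow]
    rw [dif_neg (by
      intro hfind
      exact hp (pv_mem_of_find_ne p hfind))]
    simp [pvInter]
  | cons q qs ih =>
    intro p num hp hq
    have hqfree : '#' ∉ q := hq q (by simp)
    have hqs : ∀ r ∈ qs, '#' ∉ r := fun r hr => hq r (by simp [hr])
    have hrow : PySem.Chars.join ['#'] (p :: q :: qs) =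
        p ++ '#' :: PySem.Chars.join ['#'] (q :: qs) := by
      rw [PySem.Chars.join_cons_cons]; simp
    have hmem : '#' ∈ PySem.Chars.join ['#'] (p :: q :: qs) := by
      rw [hrow]; simp
    rw [pvNumRow]
    rw [dif_pos ((PySem.Chars.find_ne_neg_one_iff _ _).mpr ((pv_singleton_infix _ _).mpr hmem))]
    rw [hrow, pv_replaceFirst_eq _ p _ hp]
    have hshape : p ++ PySem.Int.toChars num ++ PySem.Chars.join ['#'] (q :: qs) =
        PySem.Chars.join ['#'] ((p ++ PySem.Int.toChars num ++ q) :: qs) := by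
      cases qs with
      | nil => simp [PySem.Chars.join_singleton]
      | cons r rs => simp [PySem.Chars.join_cons_cons]
    rw [hshape]
    have hfree : '#' ∉ p ++ PySem.Int.toChars num ++ q := by
      simp only [List.mem_append, not_or]
      exact ⟨⟨hp, pv_hash_not_in_toChars num⟩, hqfree⟩
    rw [ih _ (num + 1) hfree hqs]
    refine Prod.ext ?_ ?_
    · simp only [List.length_cons]; push_cast; ring
    · simp [pvInter]

theorem pv_fold_alt (ps : List (List Char)) : ∀ (acc : List (List Char)) (num : Int),
    (ps.foldl (fun (s : List (List Char) × Int) part =>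
        (s.1 ++ [PySem.Int.toChars s.2, part], s.2 + 1)) (acc, num)).2 = num + ps.length ∧
    PySem.Chars.join [] ((ps.foldl (fun (s : List (List Char) × Int) part =>
        (s.1 ++ [PySem.Int.toChars s.2, part], s.2 + 1)) (acc, num)).1) =
      PySem.Chars.join [] acc ++ pvInter num ps := by
  induction ps with
  | nil => intro acc num; simp [pvInter]
  | cons q qs ih =>
    intro acc num
    obtain ⟨h1, h2⟩ := ih (acc ++ [PySem.Int.toChars num, q]) (num + 1)
    simp only [List.foldl_cons]
    refine ⟨by rw [h1]; simp only [List.length_cons]; omega, ?_⟩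
    rw [h2]
    simp [pv_join_nil, pvInter]

theorem pv_rowAlt_eq (num : Int) (row : List Char) :
    pvRowAlt num row = pvNumRow num row := by
  unfold pvRowAlt
  rw [pv_splitOn_eq]
  obtain ⟨p, ps, hsplit⟩ := List.exists_cons_of_ne_nil (pv_splitHash_ne_nil row [])
  obtain ⟨hfree, hjoin⟩ := pv_splitHash_parts row [] (by simp)
  rw [hsplit] at hfree hjoin
  simp only [hsplit, List.tail_cons, List.headD_cons]
  obtain ⟨h1, h2⟩ := pv_fold_alt ps [p] num
  have hrow : row = PySem.Chars.join ['#'] (p :: ps) := by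
    rw [hjoin]; simp
  rw [hrow, pv_numRow_join ps p num (hfree p (by simp)) (fun q hq => hfree q (by simp [hq]))]
  refine Prod.ext ?_ ?_
  · simpa using h1
  · simp only []
    rw [h2, PySem.Chars.join_singleton]

-- ===== VERDICT (by name: the statement is the Claim_ definition above) =====
theorem number_galaxies_spec : Claim_equal_number_galaxies := by
  intro data _
  unfold Spec_number_galaxies number_galaxies number_galaxies_alt
  have hf : (fun (st : Int × List String) (row : String) =>
      let r := pvNumRow st.1 row.toList
      (r.1, st.2 ++ [String.ofList r.2])) = (fun (st : Int × List String) (row : String) =>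
      let r := pvRowAlt st.1 row.toList
      (r.1, st.2 ++ [String.ofList r.2])) := by
    funext st row
    simp only [pv_rowAlt_eq]
  rw [hf]
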